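-- pv_equiv track=rewrite | github.com/milianmori/audio-sorter | audio-sorter.py | map_yamnet_label
-- ===== SOURCE A (Python) =====
-- from typing import Dict, List, Optional, Tuple
--
-- def map_yamnet_label(lbl: Optional[str]) -> Optional[Tuple[str,str,str]]:
--     if not lbl:
--         return None
--     l = lbl.lower()
--     if any(k in l for k in ["speech","talk","conversation","narration"]):
--         return ("7_Vocals","Spoken", f"yamnet:{l}")
--     if any(k in l for k in ["singing","choir","chant"]):
--         return ("7_Vocals","Sung", f"yamnet:{l}")
--     if "bass drum" in l or "kick drum" in l:
--         return ("1_Kicks","Electronic", f"yamnet:{l}")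
--     if "snare" in l:
--         return ("2_Snares_Claps","Snares_Electronic", f"yamnet:{l}")
--     if "hi-hat" in l or "cymbal" in l:
--         return ("3_HiHats","Closed", f"yamnet:{l}")
--     if "tom-tom" in l:
--         return ("4_Percussion","Toms", f"yamnet:{l}")
--     if any(k in l for k in ["rain","water","ocean","stream","river"]):
--         return ("8_Field_Recordings","Water", f"yamnet:{l}")
--     if any(k in l for k in ["wind","thunder","storm"]):
--         return ("8_Field_Recordings","Nature", f"yamnet:{l}")
--     if any(k in l for k in ["vehicle","car","train","airplane","traffic","urban","crowd"]):
--         return ("8_Field_Recordings","Urban", f"yamnet:{l}")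
--     if any(k in l for k in ["animal","bird","dog","cat","insect"]):
--         return ("8_Field_Recordings","Animals", f"yamnet:{l}")
--     if "music" in l or "instrument" in l:
--         return ("5_Synth","FX", f"yamnet:{l}")
--     return None
-- ===== SOURCE B (Python) =====
-- from typing import Optional, Tuple
--
-- # Flat keyword index: each keyword maps to (priority, category, subcategory).
-- # B scans ALL keywords once and keeps the lowest-priority match (no early exit),
-- # instead of A's ordered if-cascade with early returns.
-- KEYWORDS = {
--     "speech": (0, "7_Vocals", "Spoken"),
--     "talk": (0, "7_Vocals", "Spoken"),
--     "conversation": (0, "7_Vocals", "Spoken"),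
--     "narration": (0, "7_Vocals", "Spoken"),
--     "singing": (1, "7_Vocals", "Sung"),
--     "choir": (1, "7_Vocals", "Sung"),
--     "chant": (1, "7_Vocals", "Sung"),
--     "bass drum": (2, "1_Kicks", "Electronic"),
--     "kick drum": (2, "1_Kicks", "Electronic"),
--     "snare": (3, "2_Snares_Claps", "Snares_Electronic"),
--     "hi-hat": (4, "3_HiHats", "Closed"),
--     "cymbal": (4, "3_HiHats", "Closed"),
--     "tom-tom": (5, "4_Percussion", "Toms"),
--     "rain": (6, "8_Field_Recordings", "Water"),
--     "water": (6, "8_Field_Recordings", "Water"),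
--     "ocean": (6, "8_Field_Recordings", "Water"),
--     "stream": (6, "8_Field_Recordings", "Water"),
--     "river": (6, "8_Field_Recordings", "Water"),
--     "wind": (7, "8_Field_Recordings", "Nature"),
--     "thunder": (7, "8_Field_Recordings", "Nature"),
--     "storm": (7, "8_Field_Recordings", "Nature"),
--     "vehicle": (8, "8_Field_Recordings", "Urban"),
--     "car": (8, "8_Field_Recordings", "Urban"),
--     "train": (8, "8_Field_Recordings", "Urban"),
--     "airplane": (8, "8_Field_Recordings", "Urban"),
--     "traffic": (8, "8_Field_Recordings", "Urban"),
--     "urban": (8, "8_Field_Recordings", "Urban"),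
--     "crowd": (8, "8_Field_Recordings", "Urban"),
--     "animal": (9, "8_Field_Recordings", "Animals"),
--     "bird": (9, "8_Field_Recordings", "Animals"),
--     "dog": (9, "8_Field_Recordings", "Animals"),
--     "cat": (9, "8_Field_Recordings", "Animals"),
--     "insect": (9, "8_Field_Recordings", "Animals"),
--     "music": (10, "5_Synth", "FX"),
--     "instrument": (10, "5_Synth", "FX"),
-- }
--
-- def map_yamnet_label(lbl: Optional[str]) -> Optional[Tuple[str, str, str]]:
--     if not lbl:
--         return None
--     l = lbl.lower()
--     best = None
--     for kw, (p, cat, sub) in KEYWORDS.items():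
--         if kw in l and (best is None or p < best[0]):
--             best = (p, cat, sub)
--     if best is None:
--         return None
--     return (best[1], best[2], f"yamnet:{l}")
-- ===== Notes on version B (the rewrite author's own statement) =====
-- stated objective: alternative
-- what changed: A's ordered if-cascade with early returns is replaced by a flat keyword-to-(priority,category,subcategory) index scanned once in full, keeping the lowest-priority matching keyword in an accumulator and building the result at the end.
import Mathlib
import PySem

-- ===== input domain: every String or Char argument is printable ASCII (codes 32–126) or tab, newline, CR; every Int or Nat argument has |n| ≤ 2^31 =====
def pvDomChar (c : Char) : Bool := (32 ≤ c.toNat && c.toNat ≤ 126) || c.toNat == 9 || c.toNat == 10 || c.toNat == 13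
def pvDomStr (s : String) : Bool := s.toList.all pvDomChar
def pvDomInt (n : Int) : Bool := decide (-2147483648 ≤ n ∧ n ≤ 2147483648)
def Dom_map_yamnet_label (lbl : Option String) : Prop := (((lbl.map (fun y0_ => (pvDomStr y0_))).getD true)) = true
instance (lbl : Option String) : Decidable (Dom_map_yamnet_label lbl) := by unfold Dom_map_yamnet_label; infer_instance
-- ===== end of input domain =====

-- B replaces A's early-return if-cascade by one full scan over a flat keyword index,
-- keeping the lowest-priority matching keyword (objective: alternative).


-- ===== PORT A =====
def map_yamnet_label (lbl : Option String) : Option (String × String × String) :=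
  match lbl with
  | none => none
  | some s =>
    if s = "" then none else
    let l := PySem.Str.lower s
    if ["speech","talk","conversation","narration"].any (fun k => PySem.Str.isIn k l) then
      some ("7_Vocals", "Spoken", "yamnet:" ++ l)
    else if ["singing","choir","chant"].any (fun k => PySem.Str.isIn k l) then
      some ("7_Vocals", "Sung", "yamnet:" ++ l)
    else if PySem.Str.isIn "bass drum" l || PySem.Str.isIn "kick drum" l then
      some ("1_Kicks", "Electronic", "yamnet:" ++ l)
    else if PySem.Str.isIn "snare" l then
      some ("2_Snares_Claps", "Snares_Electronic", "yamnet:" ++ l)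
    else if PySem.Str.isIn "hi-hat" l || PySem.Str.isIn "cymbal" l then
      some ("3_HiHats", "Closed", "yamnet:" ++ l)
    else if PySem.Str.isIn "tom-tom" l then
      some ("4_Percussion", "Toms", "yamnet:" ++ l)
    else if ["rain","water","ocean","stream","river"].any (fun k => PySem.Str.isIn k l) then
      some ("8_Field_Recordings", "Water", "yamnet:" ++ l)
    else if ["wind","thunder","storm"].any (fun k => PySem.Str.isIn k l) then
      some ("8_Field_Recordings", "Nature", "yamnet:" ++ l)
    else if ["vehicle","car","train","airplane","traffic","urban","crowd"].any (fun k => PySem.Str.isIn k l) then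
      some ("8_Field_Recordings", "Urban", "yamnet:" ++ l)
    else if ["animal","bird","dog","cat","insect"].any (fun k => PySem.Str.isIn k l) then
      some ("8_Field_Recordings", "Animals", "yamnet:" ++ l)
    else if PySem.Str.isIn "music" l || PySem.Str.isIn "instrument" l then
      some ("5_Synth", "FX", "yamnet:" ++ l)
    else none

-- ===== PORT B =====
-- B's flat keyword index KEYWORDS: keyword ↦ (priority, category, subcategory), insertion order
def yamnetKeywords : List (String × Nat × String × String) :=
  [ ("speech", 0, "7_Vocals", "Spoken"), ("talk", 0, "7_Vocals", "Spoken"),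
    ("conversation", 0, "7_Vocals", "Spoken"), ("narration", 0, "7_Vocals", "Spoken"),
    ("singing", 1, "7_Vocals", "Sung"), ("choir", 1, "7_Vocals", "Sung"), ("chant", 1, "7_Vocals", "Sung"),
    ("bass drum", 2, "1_Kicks", "Electronic"), ("kick drum", 2, "1_Kicks", "Electronic"),
    ("snare", 3, "2_Snares_Claps", "Snares_Electronic"),
    ("hi-hat", 4, "3_HiHats", "Closed"), ("cymbal", 4, "3_HiHats", "Closed"),
    ("tom-tom", 5, "4_Percussion", "Toms"),
    ("rain", 6, "8_Field_Recordings", "Water"), ("water", 6, "8_Field_Recordings", "Water"),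
    ("ocean", 6, "8_Field_Recordings", "Water"), ("stream", 6, "8_Field_Recordings", "Water"),
    ("river", 6, "8_Field_Recordings", "Water"),
    ("wind", 7, "8_Field_Recordings", "Nature"), ("thunder", 7, "8_Field_Recordings", "Nature"),
    ("storm", 7, "8_Field_Recordings", "Nature"),
    ("vehicle", 8, "8_Field_Recordings", "Urban"), ("car", 8, "8_Field_Recordings", "Urban"),
    ("train", 8, "8_Field_Recordings", "Urban"), ("airplane", 8, "8_Field_Recordings", "Urban"),
    ("traffic", 8, "8_Field_Recordings", "Urban"), ("urban", 8, "8_Field_Recordings", "Urban"),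
    ("crowd", 8, "8_Field_Recordings", "Urban"),
    ("animal", 9, "8_Field_Recordings", "Animals"), ("bird", 9, "8_Field_Recordings", "Animals"),
    ("dog", 9, "8_Field_Recordings", "Animals"), ("cat", 9, "8_Field_Recordings", "Animals"),
    ("insect", 9, "8_Field_Recordings", "Animals"),
    ("music", 10, "5_Synth", "FX"), ("instrument", 10, "5_Synth", "FX") ]

-- body of Source B's loop: update the best (lowest-priority) match seen so far
def yamnetPick (l : String) (best : Option (Nat × String × String))
    (e : String × Nat × String × String) : Option (Nat × String × String) :=
  match e with
  | (kw, p, cat, sub) =>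
    if PySem.Str.isIn kw l &&
        (match best with | none => true | some (bp, _, _) => decide (p < bp)) then
      some (p, cat, sub)
    else best

-- Source B's final step: 'if best is None: return None; return (best[1], best[2], f"yamnet:{l}")'
def yamnetFinish (l : String) (best : Option (Nat × String × String)) : Option (String × String × String) :=
  match best with
  | none => none
  | some (_, cat, sub) => some (cat, sub, "yamnet:" ++ l)

def map_yamnet_label_alt (lbl : Option String) : Option (String × String × String) :=
  match lbl with
  | none => none
  | some s =>
    if s = "" then none else
    let l := PySem.Str.lower s
    yamnetFinish l (yamnetKeywords.foldl (yamnetPick l) none)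

-- ===== PRECONDITION & SPEC =====
def Spec_map_yamnet_label (lbl : Option String) (out : Option (String × String × String)) : Prop := out = map_yamnet_label_alt lbl
instance (lbl : Option String) (out : Option (String × String × String)) : Decidable (Spec_map_yamnet_label lbl out) := by unfold Spec_map_yamnet_label; infer_instance

-- ===== CLAIM (what is proved, stated in full; the proofs are below) =====
def Claim_equal_map_yamnet_label : Prop := ∀ (lbl : Option String), Dom_map_yamnet_label lbl → Spec_map_yamnet_label lbl (map_yamnet_label lbl)

-- ===== LEMMAS AND PROOFS =====

-- once the accumulator holds a priority no later entry beats, the rest of the scan is inert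
theorem yamnet_fold_skip (l : String) (bp : Nat) (c s : String)
    (ks : List (String × Nat × String × String)) (h : ∀ e ∈ ks, bp ≤ e.2.1) :
    List.foldl (yamnetPick l) (some (bp, c, s)) ks = some (bp, c, s) := by
  induction ks with
  | nil => rfl
  | cons e rest ih =>
    obtain ⟨kw, p, cat, sub⟩ := e
    have hbp : bp ≤ p := h _ (List.mem_cons_self ..)
    simp only [List.foldl_cons, yamnetPick]
    rw [if_neg]
    · exact ih fun e he => h e (List.mem_cons_of_mem _ he)
    · simp [Nat.not_lt.mpr hbp]

-- scanning one same-priority keyword group from an empty accumulator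
theorem yamnet_fold_group (l : String) (p : Nat) (c s : String) (kws : List String) :
    List.foldl (yamnetPick l) none (kws.map fun kw => (kw, p, c, s)) =
      if kws.any (fun k => PySem.Str.isIn k l) then some (p, c, s) else none := by
  induction kws with
  | nil => rfl
  | cons kw rest ih =>
    simp only [List.map_cons, List.foldl_cons, List.any_cons, yamnetPick]
    by_cases hk : PySem.Str.isIn kw l = true
    · rw [if_pos (by rw [hk]; rfl)]
      rw [yamnet_fold_skip l p c s _
        (by intro e he; obtain ⟨kw', -, rfl⟩ := List.mem_map.mp he; exact le_refl p)]
      rw [if_pos (by rw [hk]; rfl)]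
    · have hk' : PySem.Str.isIn kw l = false := by
        cases hx : PySem.Str.isIn kw l
        · rfl
        · exact absurd hx hk
      rw [if_neg (by rw [hk']; exact Bool.false_ne_true)]
      rw [ih]
      by_cases h2 : rest.any (fun k => PySem.Str.isIn k l) = true
      · rw [if_pos h2, if_pos (by rw [hk', h2]; rfl)]
      · have h2' : rest.any (fun k => PySem.Str.isIn k l) = false := by
          cases hx : rest.any (fun k => PySem.Str.isIn k l)
          · rfl
          · exact absurd hx h2
        rw [if_neg (by rw [h2']; exact Bool.false_ne_true),
            if_neg (by rw [hk', h2']; exact Bool.false_ne_true)]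

-- one group followed by the rest of the index: first-match-or-continue
theorem yamnet_fold_step (l : String) (p : Nat) (c s : String) (kws : List String)
    (rest : List (String × Nat × String × String)) (hrest : ∀ e ∈ rest, p ≤ e.2.1) :
    List.foldl (yamnetPick l) none ((kws.map fun kw => (kw, p, c, s)) ++ rest) =
      if kws.any (fun k => PySem.Str.isIn k l) then some (p, c, s)
      else List.foldl (yamnetPick l) none rest := by
  rw [List.foldl_append, yamnet_fold_group]
  by_cases h : kws.any (fun k => PySem.Str.isIn k l)
  · rw [if_pos h, if_pos h, yamnet_fold_skip l p c s rest hrest]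
  · rw [if_neg h, if_neg h]

-- the flat index is eleven priority groups in order
theorem yamnetKeywords_groups :
    yamnetKeywords =
      (["speech","talk","conversation","narration"].map fun kw => (kw, 0, "7_Vocals", "Spoken")) ++
      ((["singing","choir","chant"].map fun kw => (kw, 1, "7_Vocals", "Sung")) ++
      ((["bass drum","kick drum"].map fun kw => (kw, 2, "1_Kicks", "Electronic")) ++
      ((["snare"].map fun kw => (kw, 3, "2_Snares_Claps", "Snares_Electronic")) ++
      ((["hi-hat","cymbal"].map fun kw => (kw, 4, "3_HiHats", "Closed")) ++
      ((["tom-tom"].map fun kw => (kw, 5, "4_Percussion", "Toms")) ++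
      ((["rain","water","ocean","stream","river"].map fun kw => (kw, 6, "8_Field_Recordings", "Water")) ++
      ((["wind","thunder","storm"].map fun kw => (kw, 7, "8_Field_Recordings", "Nature")) ++
      ((["vehicle","car","train","airplane","traffic","urban","crowd"].map fun kw => (kw, 8, "8_Field_Recordings", "Urban")) ++
      ((["animal","bird","dog","cat","insect"].map fun kw => (kw, 9, "8_Field_Recordings", "Animals")) ++
      ((["music","instrument"].map fun kw => (kw, 10, "5_Synth", "FX")) ++ ([] : List (String × Nat × String × String)))))))))))) := by
  rfl

-- exhaustive case analysis over the eleven match booleans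
theorem yamnet_cases (l : String) (b0 b1 b2 b3 b4 b5 b6 b7 b8 b9 b10 : Bool) :
    (if b0 then some ("7_Vocals", "Spoken", "yamnet:" ++ l) else if b1 then some ("7_Vocals", "Sung", "yamnet:" ++ l) else if b2 then some ("1_Kicks", "Electronic", "yamnet:" ++ l) else if b3 then some ("2_Snares_Claps", "Snares_Electronic", "yamnet:" ++ l) else if b4 then some ("3_HiHats", "Closed", "yamnet:" ++ l) else if b5 then some ("4_Percussion", "Toms", "yamnet:" ++ l) else if b6 then some ("8_Field_Recordings", "Water", "yamnet:" ++ l) else if b7 then some ("8_Field_Recordings", "Nature", "yamnet:" ++ l) else if b8 then some ("8_Field_Recordings", "Urban", "yamnet:" ++ l) else if b9 then some ("8_Field_Recordings", "Animals", "yamnet:" ++ l) else if b10 then some ("5_Synth", "FX", "yamnet:" ++ l) else none) = yamnetFinish l (if b0 then some ((0 : Nat), "7_Vocals", "Spoken") else if b1 then some ((1 : Nat), "7_Vocals", "Sung") else if b2 then some ((2 : Nat), "1_Kicks", "Electronic") else if b3 then some ((3 : Nat), "2_Snares_Claps", "Snares_Electronic") else if b4 then some ((4 : Nat), "3_HiHats",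 "Closed") else if b5 then some ((5 : Nat), "4_Percussion", "Toms") else if b6 then some ((6 : Nat), "8_Field_Recordings", "Water") else if b7 then some ((7 : Nat), "8_Field_Recordings", "Nature") else if b8 then some ((8 : Nat), "8_Field_Recordings", "Urban") else if b9 then some ((9 : Nat), "8_Field_Recordings", "Animals") else if b10 then some ((10 : Nat), "5_Synth", "FX") else none) := by
  cases b0 with
    | false =>
      cases b1 with
        | false =>
          cases b2 with
            | false =>
              cases b3 with
                | false =>
                  cases b4 with
                    | false =>
                      cases b5 with
                        | false =>
                          cases b6 with
                            | false =>
                              cases b7 with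
                                | false =>
                                  cases b8 with
                                    | false =>
                                      cases b9 with
                                        | false =>
                                          cases b10 with
                                            | false =>
                                              rfl
                                            | true => rfl
                                        | true => rfl
                                    | true => rfl
                                | true => rfl
                            | true => rfl
                        | true => rfl
                    | true => rfl
                | true => rfl
            | true => rfl
        | true => rfl
    | true => rfl

-- ===== VERDICT (by name: the statement is the Claim_ definition above) =====
theorem map_yamnet_label_spec : Claim_equal_map_yamnet_label := by
  intro lbl _
  unfold Spec_map_yamnet_label map_yamnet_label map_yamnet_label_alt
  cases lbl with
  | none => rfl
  | some s =>
    by_cases h : s = ""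
    · subst h; rfl
    · dsimp only
      rw [if_neg h, if_neg h]
      rw [yamnetKeywords_groups]
      rw [yamnet_fold_step _ _ _ _ _ _ (by decide)]
      rw [yamnet_fold_step _ _ _ _ _ _ (by decide)]
      rw [yamnet_fold_step _ _ _ _ _ _ (by decide)]
      rw [yamnet_fold_step _ _ _ _ _ _ (by decide)]
      rw [yamnet_fold_step _ _ _ _ _ _ (by decide)]
      rw [yamnet_fold_step _ _ _ _ _ _ (by decide)]
      rw [yamnet_fold_step _ _ _ _ _ _ (by decide)]
      rw [yamnet_fold_step _ _ _ _ _ _ (by decide)]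
      rw [yamnet_fold_step _ _ _ _ _ _ (by decide)]
      rw [yamnet_fold_step _ _ _ _ _ _ (by decide)]
      rw [yamnet_fold_step _ _ _ _ _ _ (by decide)]
      simp only [List.any_cons, List.any_nil, Bool.or_false, List.foldl_nil]
      exact yamnet_cases (PySem.Str.lower s) _ _ _ _ _ _ _ _ _ _ _
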